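-- pv_equiv track=rewrite | github.com/LouiseALD/busca_termos_arquivos_streamlit | chatbot-11-05/chatbot/converters/query_validator.py | verificar_multiplas_possibilidades
-- ===== SOURCE A (Python) =====
-- def verificar_multiplas_possibilidades(resultados_filtrados):
--     """Verifica se há múltiplas possibilidades de mapeamento que requerem seleção."""
--     # Agrupar mapeamentos por tabela
--     tabelas_mapeadas = {}
--     for item in resultados_filtrados:
--         # Verificar se item é um dicionário válido
--         if not isinstance(item, dict):
--             continue
--
--         tabela_oc3 = item.get("TABELA OC3 LIGHT", "")
--         if not tabela_oc3:  # Pular se não tiver tabela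
--             continue
--
--         if tabela_oc3 not in tabelas_mapeadas:
--             tabelas_mapeadas[tabela_oc3] = []
--         tabelas_mapeadas[tabela_oc3].append(item)
--
--     # Verificar se há mais de uma tabela ou mapeamentos ambíguos
--     multiplas_tabelas = len(tabelas_mapeadas) > 1
--     tem_ambiguidade = False
--
--     # Verificar se há ambiguidade (múltiplos mapeamentos para um mesmo campo)
--     if not multiplas_tabelas:
--         # Se temos apenas uma tabela, verificar se há ambiguidade nos campos
--         campos_por_tabela = {}
--         for tabela, mapeamentos in tabelas_mapeadas.items():
--             campos_por_tabela[tabela] = {}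
--             for item in mapeamentos:
--                 campo = item.get("CAMPO OC3 LIGHT", "")
--                 if campo not in campos_por_tabela[tabela]:
--                     campos_por_tabela[tabela][campo] = 0
--                 campos_por_tabela[tabela][campo] += 1
--
--         # Se algum campo tiver mais de um mapeamento, há ambiguidade
--         for tabela, campos in campos_por_tabela.items():
--             for campo, contagem in campos.items():
--                 if contagem > 1:
--                     tem_ambiguidade = True
--                     break
--
--     return multiplas_tabelas or tem_ambiguidade, tabelas_mapeadas
-- ===== SOURCE B (Python) =====
-- def verificar_multiplas_possibilidades(resultados_filtrados):
--     """Verifica se há múltiplas possibilidades de mapeamento que requerem seleção."""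
--     validos = [item for item in resultados_filtrados
--                if isinstance(item, dict) and item.get("TABELA OC3 LIGHT", "")]
--     tabelas = list(dict.fromkeys(item.get("TABELA OC3 LIGHT", "") for item in validos))
--     tabelas_mapeadas = {t: [item for item in validos
--                             if item.get("TABELA OC3 LIGHT", "") == t]
--                         for t in tabelas}
--     multiplas_tabelas = len(tabelas) > 1
--     tem_ambiguidade = any(
--         len(ms) > len({item.get("CAMPO OC3 LIGHT", "") for item in ms})
--         for ms in tabelas_mapeadas.values())
--     return multiplas_tabelas or tem_ambiguidade, tabelas_mapeadas
-- ===== Notes on version B (the rewrite author's own statement) =====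
-- stated objective: simpler
-- what changed: B groups by computing the first-occurrence table keys once and filtering per table, and replaces A's nested per-table count-dictionary plus double rescan for ambiguity by a single distinctness comparison (more items than distinct CAMPO OC3 LIGHT values).
import Mathlib
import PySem

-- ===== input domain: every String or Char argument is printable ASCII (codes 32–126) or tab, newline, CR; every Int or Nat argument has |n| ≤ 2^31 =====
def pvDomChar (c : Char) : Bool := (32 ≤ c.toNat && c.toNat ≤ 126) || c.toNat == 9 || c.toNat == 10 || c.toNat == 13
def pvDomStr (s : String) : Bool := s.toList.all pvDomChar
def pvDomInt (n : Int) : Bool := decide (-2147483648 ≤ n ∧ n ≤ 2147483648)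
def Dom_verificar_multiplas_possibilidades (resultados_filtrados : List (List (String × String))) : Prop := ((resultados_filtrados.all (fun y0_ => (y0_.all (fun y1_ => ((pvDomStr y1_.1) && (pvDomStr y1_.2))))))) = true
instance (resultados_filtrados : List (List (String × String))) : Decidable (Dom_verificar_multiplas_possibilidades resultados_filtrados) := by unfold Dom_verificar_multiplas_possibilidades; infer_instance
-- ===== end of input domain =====

-- B groups by first-occurrence table keys with per-table filters and replaces A's nested
-- count-dictionary ambiguity scan by a distinctness comparison (objective: simpler).

-- ===== PORT A =====
-- item.get(k, "")
def pvGet (item : List (String × String)) (k : String) : String :=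
  (PySem.Dict.mk item).getD k ""

-- the grouping loop of A ('isinstance(item, dict)' is always true under the type convention)
def pvAgrupar (resultados_filtrados : List (List (String × String))) :
    PySem.Dict String (List (List (String × String))) :=
  resultados_filtrados.foldl (fun d item =>
    let tabela_oc3 := pvGet item "TABELA OC3 LIGHT"
    if tabela_oc3 = "" then d
    else
      let d1 := if d.contains tabela_oc3 then d else d.insert tabela_oc3 []
      d1.modify tabela_oc3 [] (fun l => l ++ [item])) PySem.Dict.empty

def verificar_multiplas_possibilidades (resultados_filtrados : List (List (String × String))) :
    Bool × (List (String × List (List (String × String)))) :=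
  let tabelas_mapeadas := pvAgrupar resultados_filtrados
  let multiplas_tabelas := decide (tabelas_mapeadas.size > 1)
  let tem_ambiguidade :=
    if !multiplas_tabelas then
      let campos_por_tabela : PySem.Dict String (PySem.Dict String Int) :=
        tabelas_mapeadas.items.foldl (fun c p =>
          let c1 := c.insert p.1 PySem.Dict.empty
          p.2.foldl (fun c2 item =>
            let campo := pvGet item "CAMPO OC3 LIGHT"
            c2.modify p.1 PySem.Dict.empty (fun inner =>
              let i1 := if inner.contains campo then inner else inner.insert campo 0
              i1.modify campo 0 (fun n => n + 1))) c1) PySem.Dict.empty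
      -- Python's inner 'break' only exits early with the flag already true: this fold has the same value
      campos_por_tabela.items.foldl (fun flag q =>
        q.2.items.foldl (fun fl r => if r.2 > (1 : Int) then true else fl) flag) false
    else false
  (multiplas_tabelas || tem_ambiguidade, tabelas_mapeadas.items)

-- ===== PORT B =====
def verificar_multiplas_possibilidades_alt (resultados_filtrados : List (List (String × String))) :
    Bool × (List (String × List (List (String × String)))) :=
  let validos := resultados_filtrados.filter (fun item => !(pvGet item "TABELA OC3 LIGHT" == ""))
  let tabelas := PySem.Set.ofList (validos.map (fun item => pvGet item "TABELA OC3 LIGHT"))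
  let tabelas_mapeadas := tabelas.map (fun t =>
    (t, validos.filter (fun item => pvGet item "TABELA OC3 LIGHT" == t)))
  let multiplas_tabelas := decide (tabelas.length > 1)
  let tem_ambiguidade := tabelas_mapeadas.any (fun p =>
    decide (p.2.length > (PySem.Set.ofList (p.2.map (fun item => pvGet item "CAMPO OC3 LIGHT"))).length))
  (multiplas_tabelas || tem_ambiguidade, tabelas_mapeadas)

-- ===== PRECONDITION & SPEC =====
def Spec_verificar_multiplas_possibilidades (resultados_filtrados : List (List (String × String))) (out : Bool × (List (String × List (List (String × String))))) : Prop := out = verificar_multiplas_possibilidades_alt resultados_filtrados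
instance (resultados_filtrados : List (List (String × String))) (out : Bool × (List (String × List (List (String × String))))) : Decidable (Spec_verificar_multiplas_possibilidades resultados_filtrados out) := by unfold Spec_verificar_multiplas_possibilidades; infer_instance

-- ===== CLAIM (what is proved, stated in full; the proofs are below) =====
def Claim_equal_verificar_multiplas_possibilidades : Prop := ∀ (resultados_filtrados : List (List (String × String))), Dom_verificar_multiplas_possibilidades resultados_filtrados → Spec_verificar_multiplas_possibilidades resultados_filtrados (verificar_multiplas_possibilidades resultados_filtrados)

-- ===== LEMMAS AND PROOFS =====

-- 'if k not in d: d[k] = v0' followed by 'd[k] = f(d[k])' is just d.modify k v0 f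
theorem pv_modify_guard {κ ν : Type} [BEq κ] [LawfulBEq κ] (d : PySem.Dict κ ν) (k : κ) (v0 : ν)
    (f : ν → ν) :
    (if d.contains k then d else d.insert k v0).modify k v0 f = d.modify k v0 f := by
  by_cases h : d.contains k
  · simp [h]
  · simp only [Bool.not_eq_true] at h
    simp only [h, Bool.false_eq_true, if_false, PySem.Dict.modify,
      PySem.Dict.getD_insert_self, PySem.Dict.insert_insert_self,
      PySem.Dict.getD_of_not_contains d v0 h]

theorem pv_agrupar_eq (rs : List (List (String × String))) :
    pvAgrupar rs =
      (rs.filter (fun it => !(pvGet it "TABELA OC3 LIGHT" == ""))).foldl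
        (fun d it => d.modify (pvGet it "TABELA OC3 LIGHT") [] (fun l => l ++ [it]))
        PySem.Dict.empty := by
  unfold pvAgrupar
  refine Eq.trans (PySem.List.foldl_congr_mem rs _
    (fun d it => if !(pvGet it "TABELA OC3 LIGHT" == "") then
      d.modify (pvGet it "TABELA OC3 LIGHT") [] (fun l => l ++ [it]) else d)
    PySem.Dict.empty ?_) ?_
  · intro acc x _
    by_cases hx : pvGet x "TABELA OC3 LIGHT" = ""
    · simp [hx]
    · simp [hx, pv_modify_guard]
  · exact PySem.List.foldl_if_eq_foldl_filter _ _ _ _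

theorem pv_keys_agrupar (rs : List (List (String × String))) :
    (pvAgrupar rs).keys =
      PySem.Set.ofList ((rs.filter (fun it => !(pvGet it "TABELA OC3 LIGHT" == ""))).map
        (fun it => pvGet it "TABELA OC3 LIGHT")) := by
  rw [pv_agrupar_eq]
  have h := PySem.Dict.keys_foldl_modify_key
    (rs.filter (fun it => !(pvGet it "TABELA OC3 LIGHT" == "")))
    (fun it => pvGet it "TABELA OC3 LIGHT") ([] : List (List (String × String)))
    (fun _ it => fun l => l ++ [it])
    (PySem.Dict.empty : PySem.Dict String (List (List (String × String))))
  rw [PySem.Dict.keys_empty, PySem.Set.update_nil_left] at h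
  exact h

theorem pv_nodup_keys_agrupar (rs : List (List (String × String))) :
    (pvAgrupar rs).keys.Nodup := by
  rw [pv_keys_agrupar]; exact PySem.Set.nodup_ofList _

theorem pv_getD_agrupar (rs : List (List (String × String))) (t : String) :
    (pvAgrupar rs).getD t [] =
      (rs.filter (fun it => !(pvGet it "TABELA OC3 LIGHT" == ""))).filter
        (fun it => pvGet it "TABELA OC3 LIGHT" == t) := by
  rw [pv_agrupar_eq]
  have h := PySem.Dict.getD_foldl_modify_append
    ((rs.filter (fun it => !(pvGet it "TABELA OC3 LIGHT" == ""))).map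
      (fun it => (pvGet it "TABELA OC3 LIGHT", it)))
    PySem.Dict.empty t
  rw [List.foldl_map] at h
  refine h.trans ?_
  simp [List.filter_map, Function.comp_def]

theorem pv_items_agrupar (rs : List (List (String × String))) :
    (pvAgrupar rs).items =
      (PySem.Set.ofList ((rs.filter (fun it => !(pvGet it "TABELA OC3 LIGHT" == ""))).map
        (fun it => pvGet it "TABELA OC3 LIGHT"))).map
        (fun t => (t, (rs.filter (fun it => !(pvGet it "TABELA OC3 LIGHT" == ""))).filter
          (fun it => pvGet it "TABELA OC3 LIGHT" == t))) := by
  rw [PySem.Dict.items_eq_map_keys _ (pv_nodup_keys_agrupar rs) [], pv_keys_agrupar]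
  exact List.map_congr_left (fun t _ => by rw [pv_getD_agrupar])

-- an inner loop that always modifies the same single key of a one-entry outer dict
theorem pv_foldl_modify_single {α : Type} (t : String)
    (g : α → PySem.Dict String Int → PySem.Dict String Int)
    (ms : List α) (innerD : PySem.Dict String Int) :
    ms.foldl (fun c2 a => c2.modify t PySem.Dict.empty (g a)) (PySem.Dict.empty.insert t innerD) =
      PySem.Dict.empty.insert t (ms.foldl (fun inner a => g a inner) innerD) := by
  induction ms generalizing innerD with
  | nil => rfl
  | cons a ms ih =>
    simp only [List.foldl_cons, PySem.Dict.modify, PySem.Dict.getD_insert_self,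
      PySem.Dict.insert_insert_self]
    exact ih (g a innerD)

-- A's inner grouping-by-campo counting loop over a single table equals a Counter
theorem pv_inner_loop (t : String) (ms : List (List (String × String))) :
    ms.foldl (fun c2 item =>
        c2.modify t PySem.Dict.empty (fun inner =>
          (if inner.contains (pvGet item "CAMPO OC3 LIGHT") then inner
           else inner.insert (pvGet item "CAMPO OC3 LIGHT") 0).modify
            (pvGet item "CAMPO OC3 LIGHT") 0 (fun n => n + 1)))
      (PySem.Dict.empty.insert t PySem.Dict.empty) =
      PySem.Dict.empty.insert t
        (PySem.Dict.counter (ms.map (fun item => pvGet item "CAMPO OC3 LIGHT"))) := by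
  rw [pv_foldl_modify_single t
    (fun item inner =>
      (if inner.contains (pvGet item "CAMPO OC3 LIGHT") then inner
       else inner.insert (pvGet item "CAMPO OC3 LIGHT") 0).modify
        (pvGet item "CAMPO OC3 LIGHT") 0 (fun n => n + 1)) ms PySem.Dict.empty]
  congr 1
  refine Eq.trans (PySem.List.foldl_congr_mem ms _
    (fun inner item => inner.modify (pvGet item "CAMPO OC3 LIGHT") 0 (fun n => n + 1))
    PySem.Dict.empty ?_) ?_
  · intro acc x _; exact pv_modify_guard acc _ 0 _
  · rw [PySem.Dict.counter_eq_foldl, List.foldl_map]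

theorem pv_foldl_flag {α : Type} (l : List α) (p : α → Prop) [DecidablePred p] (b : Bool) :
    l.foldl (fun fl r => if p r then true else fl) b = (b || l.any (fun r => decide (p r))) := by
  induction l generalizing b with
  | nil => simp
  | cons a l ih =>
    simp only [List.foldl_cons, List.any_cons, ih]
    by_cases h : p a <;> simp [h]

-- duplicates among xs ⟺ the deduplicated set is strictly shorter
theorem pv_len_ofList (xs : List String) :
    (PySem.Set.ofList xs).length = xs.dedup.length := by
  have hnd : (PySem.Set.ofList xs).Nodup := PySem.Set.nodup_ofList _
  have hfin : (PySem.Set.ofList xs).toFinset = xs.toFinset := by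
    ext a; simp [PySem.Set.mem_ofList]
  calc (PySem.Set.ofList xs).length = (PySem.Set.ofList xs).toFinset.card :=
        (List.toFinset_card_of_nodup hnd).symm
    _ = xs.toFinset.card := by rw [hfin]
    _ = xs.dedup.length := List.card_toFinset xs

theorem pv_any_count (xs : List String) :
    (PySem.Set.ofList xs).any (fun k => decide ((xs.count k : Int) > 1)) =
      decide (xs.length > (PySem.Set.ofList xs).length) := by
  rw [pv_len_ofList]
  simp only [gt_iff_lt, Nat.one_lt_cast]
  by_cases hn : xs.Nodup
  · have h1 : ∀ a, xs.count a ≤ 1 := List.nodup_iff_count_le_one.mp hn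
    have h2 : xs.dedup = xs := List.dedup_eq_self.mpr hn
    simp only [h2, lt_self_iff_false, decide_false, List.any_eq_false]
    intro k _
    simp only [decide_eq_true_eq, not_lt]
    exact h1 k
  · obtain ⟨k, hk⟩ : ∃ k, 1 < xs.count k := by
      by_contra h
      exact hn (List.nodup_iff_count_le_one.mpr (fun a => not_lt.mp (fun hlt => h ⟨a, hlt⟩)))
    have hmem : k ∈ xs := List.count_pos_iff.mp (lt_trans one_pos hk)
    have hlt : xs.dedup.length < xs.length := by
      rcases lt_or_eq_of_le (xs.dedup_sublist.length_le) with h | h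
      · exact h
      · exact absurd (xs.dedup_sublist.eq_of_length h ▸ xs.nodup_dedup) hn
    simp only [hlt, decide_true, List.any_eq_true]
    exact ⟨k, (PySem.Set.mem_ofList _ _).mpr hmem, by simpa using hk⟩

-- the boolean of A equals the boolean of B, over the common grouped structure
theorem pv_aux (T : List String) (M : String → List (List (String × String))) :
    (decide (T.length > 1) ||
      (if !decide (T.length > 1) then
        ((T.map (fun t => (t, M t))).foldl (fun c p =>
          p.2.foldl (fun c2 item =>
            c2.modify p.1 PySem.Dict.empty (fun inner =>
              (if inner.contains (pvGet item "CAMPO OC3 LIGHT") then inner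
               else inner.insert (pvGet item "CAMPO OC3 LIGHT") 0).modify
                (pvGet item "CAMPO OC3 LIGHT") 0 (fun n => n + 1)))
            (c.insert p.1 PySem.Dict.empty)) PySem.Dict.empty).items.foldl
          (fun flag q => q.2.items.foldl (fun fl r => if r.2 > (1 : Int) then true else fl) flag)
          false
      else false)) =
    (decide (T.length > 1) ||
      (T.map (fun t => (t, M t))).any (fun p =>
        decide (p.2.length >
          (PySem.Set.ofList (p.2.map (fun item => pvGet item "CAMPO OC3 LIGHT"))).length))) := by
  match T with
  | [] => rfl
  | t :: u :: rest =>
    have h : decide ((t :: u :: rest).length > 1) = true := by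
      simp [List.length_cons]
    rw [h]; rfl
  | [t] =>
    have h : decide (([t] : List String).length > 1) = false := by simp
    rw [h]
    simp only [Bool.not_false, if_true, Bool.false_or, List.map_cons, List.map_nil,
      List.foldl_cons, List.foldl_nil, List.any_cons, List.any_nil, Bool.or_false]
    rw [pv_inner_loop t (M t)]
    rw [PySem.Dict.items_insert_of_not_contains _ _ (PySem.Dict.contains_empty t)]
    have hemp : (PySem.Dict.empty : PySem.Dict String (PySem.Dict String Int)).items = [] := rfl
    rw [hemp]
    simp only [List.nil_append, List.foldl_cons, List.foldl_nil]
    rw [pv_foldl_flag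
        (PySem.Dict.counter ((M t).map (fun item => pvGet item "CAMPO OC3 LIGHT"))).items
        (fun r : String × Int => r.2 > (1 : Int)) false,
      PySem.Dict.items_counter, List.any_map]
    simp only [Function.comp_def, Bool.false_or]
    rw [pv_any_count]
    simp [List.length_map]

-- ===== VERDICT (by name: the statement is the Claim_ definition above) =====
theorem verificar_multiplas_possibilidades_spec : Claim_equal_verificar_multiplas_possibilidades := by
  intro rs _
  unfold Spec_verificar_multiplas_possibilidades verificar_multiplas_possibilidades
    verificar_multiplas_possibilidades_alt
  have hitems := pv_items_agrupar rs
  have hsize : (pvAgrupar rs).size =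
      (PySem.Set.ofList ((rs.filter (fun it => !(pvGet it "TABELA OC3 LIGHT" == ""))).map
        (fun it => pvGet it "TABELA OC3 LIGHT"))).length := by
    show (pvAgrupar rs).items.length = _
    rw [hitems, List.length_map]
  dsimp only
  rw [hitems, hsize, Prod.mk.injEq]
  exact ⟨pv_aux _ _, rfl⟩
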